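-- pv_equiv track=rewrite | github.com/vlnn/zt | tools/zlm_forward.py | encode_context
-- ===== SOURCE A (Python) =====
-- def hash_ngram(ngram: str, offset: int, num_buckets: int = 128) -> int:
--     h = (offset * 7) & 0xFFFF
--     for c in ngram:
--         h = (h * 31 + ord(c)) & 0xFFFF
--     return h % num_buckets
--
-- def encode_context(recent: str, num_buckets: int = 128, context_len: int = 8) -> list[int]:
--     vec = [0] * num_buckets
--     tail = recent[-context_len:].lower()
--     padded = tail.rjust(context_len)
--     for n in (1, 2, 3):
--         for i in range(len(padded) - n + 1):
--             vec[hash_ngram(padded[i:i + n], i, num_buckets)] += 1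
--     return vec
-- ===== SOURCE B (Python) =====
-- def encode_context(recent: str, num_buckets: int = 128, context_len: int = 8) -> list[int]:
--     vec = [0] * num_buckets
--     padded = recent[-context_len:].lower().rjust(context_len)
--     L = len(padded)
--     for i in range(L):
--         h = (i * 7) & 0xFFFF
--         for j in range(i, min(i + 3, L)):
--             h = (h * 31 + ord(padded[j])) & 0xFFFF
--             vec[h % num_buckets] += 1
--     return vec
-- ===== Notes on version B (the rewrite author's own statement) =====
-- stated objective: alternative
-- what changed: B inverts the two loops: a single pass over start positions extends each n-gram hash incrementally (h = h*31+ord(c)) from a shared per-position seed, instead of rehashing every length-1/2/3 n-gram from scratch in three separate passes; the order of bucket increments changes but increments commute.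
import Mathlib
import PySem

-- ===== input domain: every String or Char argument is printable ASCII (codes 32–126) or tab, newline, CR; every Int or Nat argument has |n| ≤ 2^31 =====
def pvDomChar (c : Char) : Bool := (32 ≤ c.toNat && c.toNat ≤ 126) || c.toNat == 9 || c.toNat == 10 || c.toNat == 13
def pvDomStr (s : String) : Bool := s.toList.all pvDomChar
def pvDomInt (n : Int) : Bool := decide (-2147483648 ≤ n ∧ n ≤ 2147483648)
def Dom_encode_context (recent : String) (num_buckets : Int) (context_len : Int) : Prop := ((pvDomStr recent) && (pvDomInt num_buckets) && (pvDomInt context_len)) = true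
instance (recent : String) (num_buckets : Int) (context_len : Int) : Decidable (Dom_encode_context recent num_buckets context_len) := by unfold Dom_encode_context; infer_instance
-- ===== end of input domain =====

-- B inverts the two loops: one pass over start positions extends each n-gram hash incrementally
-- from a shared per-position seed instead of rehashing every length-1/2/3 n-gram from scratch
-- in three separate passes (objective: alternative; the order of bucket increments changes,
-- and increments commute).

-- shared primitive: Python's `vec[k] += 1` (both sources contain this exact statement);
-- index resolution is PySem.List.pyIdx? (exact), the vector is an Array for O(1) update
def pvInc (vec : Array Int) (k : Int) : Array Int :=
  match PySem.List.pyIdx? vec.size k with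
  | none => vec
  | some j => vec.setIfInBounds j (vec.getD j 0 + 1)
def pvPad (recent : String) (context_len : Int) : List Char :=
  let tail := PySem.Chars.lower (PySem.List.slice recent.toList (some (-context_len)) none)
  List.replicate (context_len.toNat - tail.length) ' ' ++ tail
-- ===== PORT A =====
-- offset is a loop index (>= 0) and h stays a nonnegative int, so Nat with `&&&` is exact;
-- `for i in range(len(padded)-n+1)` walks the suffixes of padded: the guard i+n<=L is the range
-- bound and padded[i:i+n] is `take n` of the current suffix
def hash_ngram (ngram : List Char) (offset : Nat) (num_buckets : Int) : Int :=
  let h : Nat := (offset * 7) &&& 0xFFFF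
  let h := ngram.foldl (fun h c => (h * 31 + c.toNat) &&& 0xFFFF) h
  PySem.Int.mod (h : Int) num_buckets
def pvPassA (nb : Int) (n L : Nat) : List Char → Nat → Array Int → Array Int
  | [], _, vec => vec
  | c :: rest, i, vec =>
    if i + n ≤ L then
      pvPassA nb n L rest (i + 1) (pvInc vec (hash_ngram ((c :: rest).take n) i nb))
    else vec
def encode_context (recent : String) (num_buckets : Int) (context_len : Int) : List Int :=
  let vec := Array.replicate num_buckets.toNat (0 : Int)
  let padded := pvPad recent context_len
  ([1, 2, 3].foldl (fun vec n => pvPassA num_buckets n padded.length padded 0 vec) vec).toList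
-- ===== PORT B =====
-- outer loop over start positions as recursion on the suffix; the inner
-- `for j in range(i, min(i+3,L))` reads exactly the first <= 3 chars of that suffix
def pvGoB (nb : Int) : List Char → Nat → Array Int → Array Int
  | [], _, vec => vec
  | c :: rest, i, vec =>
    let st := ((c :: rest).take 3).foldl
      (fun (st : Nat × Array Int) c =>
        let h := (st.1 * 31 + c.toNat) &&& 0xFFFF
        (h, pvInc st.2 (PySem.Int.mod (h : Int) nb)))
      ((i * 7) &&& 0xFFFF, vec)
    pvGoB nb rest (i + 1) st.2
def encode_context_alt (recent : String) (num_buckets : Int) (context_len : Int) : List Int :=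
  let vec := Array.replicate num_buckets.toNat (0 : Int)
  let padded := pvPad recent context_len
  (pvGoB num_buckets padded 0 vec).toList


-- ===== PRECONDITION & SPEC =====
-- Pre_ excludes exactly the inputs where A raises: num_buckets <= 0 together with a nonempty
-- padded string (ZeroDivisionError / IndexError on the first bucket update). The second disjunct
-- says the padded string is empty, where A returns normally for any num_buckets.
def Pre_encode_context (recent : String) (num_buckets : Int) (context_len : Int) : Prop :=
  0 < num_buckets ∨ (context_len ≤ 0 ∧ PySem.Str.len recent ≤ -context_len)
instance (recent : String) (num_buckets : Int) (context_len : Int) : Decidable (Pre_encode_context recent num_buckets context_len) := by unfold Pre_encode_context; infer_instance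

def pvWitness_encode_context : String × Int × Int := ("ab", 4, 3)

def Spec_encode_context (recent : String) (num_buckets : Int) (context_len : Int) (out : List Int) : Prop := out = encode_context_alt recent num_buckets context_len
instance (recent : String) (num_buckets : Int) (context_len : Int) (out : List Int) : Decidable (Spec_encode_context recent num_buckets context_len out) := by unfold Spec_encode_context; infer_instance

-- ===== CLAIM (what is proved, stated in full; the proofs are below) =====
def Claim_equal_encode_context : Prop := ∀ (recent : String) (num_buckets : Int) (context_len : Int), Dom_encode_context recent num_buckets context_len → Pre_encode_context recent num_buckets context_len → Spec_encode_context recent num_buckets context_len (encode_context recent num_buckets context_len)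

-- ===== LEMMAS AND PROOFS =====
def pvIncL (vec : List Int) (k : Int) : List Int :=
  PySem.List.pySetD vec k (PySem.List.pyGetD vec k 0 + 1)
def pvStep (h : Nat) (c : Char) : Nat := (h * 31 + c.toNat) &&& 0xFFFF
def pvHash (p : List Char) (i n : Nat) : Nat :=
  ((p.drop i).take n).foldl pvStep ((i * 7) &&& 0xFFFF)
def pvBkt (nb : Int) (p : List Char) (i n : Nat) : Int :=
  PySem.Int.mod (pvHash p i n : Int) nb
def pvListA (nb : Int) (p : List Char) : List Int :=
  ((List.range (p.length + 1 - 1)).map (fun i => pvBkt nb p i 1)) ++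
  ((List.range (p.length + 1 - 2)).map (fun i => pvBkt nb p i 2)) ++
  ((List.range (p.length + 1 - 3)).map (fun i => pvBkt nb p i 3))
def pvListB (nb : Int) (p : List Char) : List Int :=
  (List.range p.length).flatMap
    (fun i => (List.range (min 3 (p.length - i))).map (fun m => pvBkt nb p i (m + 1)))
-- relative-index forms used by the inductions
def pvBktRel (nb : Int) (s : List Char) (i t n : Nat) : Int :=
  PySem.Int.mod ((((s.drop t).take n).foldl pvStep (((i + t) * 7) &&& 0xFFFF) : Nat) : Int) nb

lemma pvIdx_lt {n : Nat} {i : Int} {j : Nat} (h : PySem.List.pyIdx? n i = some j) : j < n := by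
  unfold PySem.List.pyIdx? at h
  split_ifs at h <;> simp_all <;> omega

lemma toList_pvInc (a : Array Int) (k : Int) : (pvInc a k).toList = pvIncL a.toList k := by
  unfold pvInc pvIncL PySem.List.pySetD PySem.List.pySet? PySem.List.pyGetD PySem.List.pyGet?
  rw [show a.toList.length = a.size from Array.length_toList]
  cases h : PySem.List.pyIdx? a.size k with
  | none => simp
  | some j =>
    have hj : j < a.size := pvIdx_lt h
    rw [Array.toList_setIfInBounds, Array.getD, dif_pos hj]
    simp [Array.getElem?_eq_getElem hj]

lemma passA_toList (nb : Int) (n L : Nat) (hn : 1 ≤ n) :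
    ∀ (s : List Char) (i : Nat) (vec : Array Int), i + s.length = L →
    (pvPassA nb n L s i vec).toList
      = ((List.range (s.length + 1 - n)).map (fun t => pvBktRel nb s i t n)).foldl
          pvIncL vec.toList := by
  intro s
  induction s with
  | nil =>
    intro i vec _
    simp only [List.length_nil, show 0 + 1 - n = 0 by omega]
    simp [pvPassA]
  | cons c rest ih =>
    intro i vec hL
    simp only [List.length_cons] at hL
    by_cases hin : i + n ≤ L
    · rw [pvPassA, if_pos hin, ih (i + 1) _ (by omega), toList_pvInc]
      rw [show (c :: rest).length + 1 - n = (rest.length + 1 - n) + 1 by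
            simp only [List.length_cons]; omega,
        List.range_succ_eq_map, List.map_cons, List.foldl_cons, List.map_map]
      have h0 : pvBktRel nb (c :: rest) i 0 n
          = hash_ngram ((c :: rest).take n) i nb := by
        unfold pvBktRel hash_ngram pvStep
        simp
      have hsh : ∀ t, pvBktRel nb (c :: rest) i (t + 1) n = pvBktRel nb rest (i + 1) t n := by
        intro t
        unfold pvBktRel
        rw [List.drop_succ_cons, show i + (t + 1) = i + 1 + t by omega]
      simp only [Function.comp_def, hsh, h0]
    · rw [pvPassA, if_neg hin,
        show (c :: rest).length + 1 - n = 0 by simp only [List.length_cons]; omega]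
      simp

lemma pvBktRel_zero (nb : Int) (p : List Char) (t n : Nat) :
    pvBktRel nb p 0 t n = pvBkt nb p t n := by
  unfold pvBktRel pvBkt pvHash
  simp

lemma encodeA_eq (recent : String) (nb cl : Int) :
    encode_context recent nb cl
      = (pvListA nb (pvPad recent cl)).foldl pvIncL (List.replicate nb.toNat 0) := by
  unfold encode_context pvListA
  simp only [List.foldl_cons, List.foldl_nil, List.foldl_append]
  rw [passA_toList nb 3 _ (by omega) _ 0 _ (by omega),
    passA_toList nb 2 _ (by omega) _ 0 _ (by omega),
    passA_toList nb 1 _ (by omega) _ 0 _ (by omega),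
    Array.toList_replicate]
  simp only [pvBktRel_zero, List.foldl_map]

lemma pvBktRel_succ (nb : Int) (c : Char) (rest : List Char) (i t n : Nat) :
    pvBktRel nb (c :: rest) i (t + 1) n = pvBktRel nb rest (i + 1) t n := by
  unfold pvBktRel
  rw [List.drop_succ_cons, show i + (t + 1) = i + 1 + t by omega]

lemma innerFold (nb : Int) :
    ∀ (cs : List Char) (h0 : Nat) (vec : Array Int),
    ((cs.foldl (fun (st : Nat × Array Int) c =>
        let h := (st.1 * 31 + c.toNat) &&& 0xFFFF
        (h, pvInc st.2 (PySem.Int.mod (h : Int) nb))) (h0, vec)).2).toList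
    = ((List.range cs.length).map (fun m =>
        PySem.Int.mod (((cs.take (m + 1)).foldl pvStep h0 : Nat) : Int) nb)).foldl
          pvIncL vec.toList := by
  intro cs
  induction cs with
  | nil => intro h0 vec; simp
  | cons c cs' ih =>
    intro h0 vec
    rw [List.foldl_cons]
    rw [ih, toList_pvInc]
    rw [List.length_cons, List.range_succ_eq_map, List.map_cons, List.foldl_cons, List.map_map]
    have h0' : ((c :: cs').take (0 + 1)).foldl pvStep h0 = pvStep h0 c := by simp
    have hsh : ∀ t, ((c :: cs').take (t + 1 + 1)).foldl pvStep h0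
        = (cs'.take (t + 1)).foldl pvStep (pvStep h0 c) := by
      intro t; rw [List.take_succ_cons, List.foldl_cons]
    simp only [Function.comp_def, hsh, h0']
    rfl

lemma goB_toList (nb : Int) :
    ∀ (s : List Char) (i : Nat) (vec : Array Int),
    (pvGoB nb s i vec).toList
    = ((List.range s.length).flatMap (fun t =>
          (List.range (min 3 (s.length - t))).map (fun m => pvBktRel nb s i t (m + 1)))).foldl
        pvIncL vec.toList := by
  intro s
  induction s with
  | nil => intro i vec; simp [pvGoB]
  | cons c rest ih =>
    intro i vec
    rw [pvGoB, ih]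
    rw [innerFold]
    rw [List.length_cons, List.range_succ_eq_map, List.flatMap_cons, List.flatMap_map,
      List.foldl_append]
    congr 1
    · congr 1
      rw [List.length_take, List.length_cons]
      apply List.map_congr_left
      intro m hm
      have hm' : m + 1 ≤ 3 := by
        have := List.mem_range.mp hm; omega
      rw [List.take_take, Nat.min_eq_left hm']
      unfold pvBktRel
      simp
    · apply List.flatMap_congr
      intro t _
      rw [show rest.length + 1 - (t + 1) = rest.length - t by omega]
      apply List.map_congr_left
      intro m _
      rw [pvBktRel_succ]

lemma encodeB_eq (recent : String) (nb cl : Int) :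
    encode_context_alt recent nb cl
      = (pvListB nb (pvPad recent cl)).foldl pvIncL (List.replicate nb.toNat 0) := by
  unfold encode_context_alt pvListB
  rw [goB_toList, Array.toList_replicate]
  simp only [pvBktRel_zero]

lemma pvIncL_none {v : List Int} {k : Int} (h : PySem.List.pyIdx? v.length k = none) :
    pvIncL v k = v := by
  unfold pvIncL PySem.List.pySetD PySem.List.pySet?
  simp [h]

lemma pvIncL_some {v : List Int} {k : Int} {j : Nat} (h : PySem.List.pyIdx? v.length k = some j) :
    pvIncL v k = v.set j (v[j]'(pvIdx_lt h) + 1) := by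
  unfold pvIncL PySem.List.pySetD PySem.List.pySet? PySem.List.pyGetD PySem.List.pyGet?
  simp [h, List.getElem?_eq_getElem (pvIdx_lt h)]

lemma pvIncL_rightComm (v : List Int) (a b : Int) :
    pvIncL (pvIncL v a) b = pvIncL (pvIncL v b) a := by
  cases ha : PySem.List.pyIdx? v.length a with
  | none =>
    cases hb : PySem.List.pyIdx? v.length b with
    | none => rw [pvIncL_none ha, pvIncL_none hb, pvIncL_none ha]
    | some jb =>
      rw [pvIncL_none ha, pvIncL_some hb, pvIncL_none (by simpa using ha)]
  | some ja =>
    cases hb : PySem.List.pyIdx? v.length b with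
    | none =>
      rw [pvIncL_some ha, pvIncL_none (by simpa using hb), pvIncL_none hb, pvIncL_some ha]
    | some jb =>
      have hja := pvIdx_lt ha; have hjb := pvIdx_lt hb
      rw [pvIncL_some ha, pvIncL_some (v := v.set ja _) (by simpa using hb),
          pvIncL_some hb, pvIncL_some (v := v.set jb _) (by simpa using ha)]
      by_cases hij : ja = jb
      · subst hij; simp [List.set_set]
      · rw [List.getElem_set_ne (by omega), List.getElem_set_ne (by omega),
            List.set_comm _ _ (by omega : ja ≠ jb)]

lemma perm_flatMap_append {α β : Type} (f g : α → List β) :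
    ∀ (l : List α), (l.flatMap fun i => f i ++ g i).Perm (l.flatMap f ++ l.flatMap g) := by
  intro l
  induction l with
  | nil => simp
  | cons x xs ih =>
    simp only [List.flatMap_cons, List.append_assoc]
    exact List.Perm.append_left _ ((List.Perm.append_left (g x) ih).trans
      (List.perm_append_comm_assoc _ _ _))

lemma flatMap_range_if (M : Nat) (f : Nat → Int) :
    ∀ (L : Nat), (List.range L).flatMap (fun i => if i < M then [f i] else [])
      = (List.range (min M L)).map f := by
  intro L
  induction L with
  | zero => simp
  | succ L ih =>
    rw [List.range_succ, List.flatMap_append, ih]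
    by_cases hL : L < M
    · rw [Nat.min_eq_right (by omega : L ≤ M), Nat.min_eq_right (by omega : L + 1 ≤ M)]
      simp [List.range_succ, hL]
    · rw [Nat.min_eq_left (by omega : M ≤ L), Nat.min_eq_left (by omega : M ≤ L + 1)]
      simp [hL]

lemma pvList_perm (nb : Int) (p : List Char) : (pvListA nb p).Perm (pvListB nb p) := by
  apply List.Perm.symm
  have hcongr : pvListB nb p = (List.range p.length).flatMap
      (fun i => (if i < p.length + 1 - 1 then [pvBkt nb p i 1] else []) ++
        ((if i < p.length + 1 - 2 then [pvBkt nb p i 2] else []) ++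
         (if i < p.length + 1 - 3 then [pvBkt nb p i 3] else []))) := by
    unfold pvListB
    apply List.flatMap_congr
    intro i hi
    have hi' : i < p.length := List.mem_range.mp hi
    by_cases h1 : p.length - i = 1
    · rw [show min 3 (p.length - i) = 1 by omega,
        if_pos (by omega), if_neg (by omega), if_neg (by omega)]
      simp
    · by_cases h2 : p.length - i = 2
      · rw [show min 3 (p.length - i) = 2 by omega,
          if_pos (by omega), if_pos (by omega), if_neg (by omega)]
        simp [List.range_succ]
      · rw [show min 3 (p.length - i) = 3 by omega,
          if_pos (by omega), if_pos (by omega), if_pos (by omega)]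
        simp [List.range_succ]
  rw [hcongr]
  refine (perm_flatMap_append _ _ _).trans ?_
  refine (List.Perm.append_left _ (perm_flatMap_append _ _ _)).trans ?_
  rw [flatMap_range_if, flatMap_range_if, flatMap_range_if,
    Nat.min_eq_left (by omega), Nat.min_eq_left (by omega), Nat.min_eq_left (by omega)]
  unfold pvListA
  simp [List.append_assoc]


-- ===== VERDICT (by name: the statement is the Claim_ definition above) =====
theorem encode_context_spec : Claim_equal_encode_context := by
  intro recent nb cl _ _
  unfold Spec_encode_context
  rw [encodeA_eq, encodeB_eq]
  exact @List.Perm.foldl_eq _ _ pvIncL _ _ ⟨fun v a b => pvIncL_rightComm v a b⟩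
    (pvList_perm nb (pvPad recent cl)) _
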